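-- pv_equiv track=rewrite | github.com/hsaito18/AoC2023 | day12.py | check_arrangement
-- ===== SOURCE A (Python) =====
-- def check_arrangement(arr, groups):
--     actual = []
--     counting = arr[0] == "#"
--     curr_count = 0
--     for c in arr:
--         if c == "?": return False
--         if c == "#":
--             curr_count += 1
--             if not counting: counting = True
--             continue
--         if c == "." and counting:
--             actual.append(curr_count)
--             counting = False
--             curr_count = 0
--     if counting:
--         actual.append(curr_count)
--     return groups == actual
-- ===== SOURCE B (Python) =====
-- def check_arrangement(arr, groups):
--     if "?" in arr:
--         return False
--     return groups == [seg.count("#") for seg in arr.split(".") if "#" in seg]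
-- ===== Notes on version B (the rewrite author's own statement) =====
-- stated objective: simpler
-- what changed: Replaces the per-character counting/flag state machine with splitting the string on '.' and comparing groups against the '#'-count of each segment that contains a '#'; Pre_ excludes only the empty string, on which A raises IndexError at arr[0].
import Mathlib
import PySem

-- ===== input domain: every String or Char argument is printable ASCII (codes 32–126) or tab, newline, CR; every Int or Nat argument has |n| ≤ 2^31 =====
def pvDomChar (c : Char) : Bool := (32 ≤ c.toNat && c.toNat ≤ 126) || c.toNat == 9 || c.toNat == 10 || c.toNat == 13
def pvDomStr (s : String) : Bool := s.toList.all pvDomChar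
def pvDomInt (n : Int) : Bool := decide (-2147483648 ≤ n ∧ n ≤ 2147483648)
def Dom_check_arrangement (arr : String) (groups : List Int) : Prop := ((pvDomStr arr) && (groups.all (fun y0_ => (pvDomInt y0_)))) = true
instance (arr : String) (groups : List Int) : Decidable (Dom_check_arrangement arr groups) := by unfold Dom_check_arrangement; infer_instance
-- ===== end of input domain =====

-- B replaces A's per-character counting/flag state machine by splitting on '.' and
-- comparing groups with the '#'-count of each segment containing a '#' (objective: simpler).

-- ===== PORT A =====
-- the for-loop of A: state (counting, curr_count, actual); none = the early 'return False' on '?'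
def chkA : List Char → Bool → Int → List Int → Option (List Int)
  | [], counting, curr, actual => some (if counting then actual ++ [curr] else actual)
  | c :: cs, counting, curr, actual =>
    if c = '?' then none
    else if c = '#' then chkA cs true (curr + 1) actual
    else if c = '.' ∧ counting then chkA cs false 0 (actual ++ [curr])
    else chkA cs counting curr actual

def check_arrangement (arr : String) (groups : List Int) : Bool :=
  match PySem.Str.pyGet? arr 0 with
  | none => false        -- arr[0] raises IndexError on empty arr: excluded by Pre_
  | some c0 =>
    match chkA arr.toList (c0 == '#') 0 [] with
    | none => false      -- 'return False' on '?'
    | some actual => decide (groups = actual)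

-- ===== PORT B =====
def check_arrangement_alt (arr : String) (groups : List Int) : Bool :=
  if arr.toList.contains '?' then false
  else decide (groups =
    ((arr.toList.splitOn '.').filter (fun seg => seg.contains '#')).map
      (fun seg => (seg.count '#' : Int)))

-- ===== PRECONDITION & SPEC =====
-- Pre_ excludes only the empty string, on which A raises IndexError at arr[0].
def Pre_check_arrangement (arr : String) (groups : List Int) : Prop := arr.toList ≠ []
instance (arr : String) (groups : List Int) : Decidable (Pre_check_arrangement arr groups) := by unfold Pre_check_arrangement; infer_instance
def pvWitness_check_arrangement : String × List Int := ("#.##", [1, 2])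

def Spec_check_arrangement (arr : String) (groups : List Int) (out : Bool) : Prop := out = check_arrangement_alt arr groups
instance (arr : String) (groups : List Int) (out : Bool) : Decidable (Spec_check_arrangement arr groups out) := by unfold Spec_check_arrangement; infer_instance

-- ===== CLAIM (what is proved, stated in full; the proofs are below) =====
def Claim_equal_check_arrangement : Prop := ∀ (arr : String) (groups : List Int), Dom_check_arrangement arr groups → Pre_check_arrangement arr groups → Spec_check_arrangement arr groups (check_arrangement arr groups)

-- ===== LEMMAS AND PROOFS =====

-- reference form of A's loop result (no accumulator, no early return)
def fRef : List Char → Bool → Int → List Int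
  | [], counting, curr => if counting then [curr] else []
  | c :: cs, counting, curr =>
    if c = '#' then fRef cs true (curr + 1)
    else if c = '.' then (if counting then curr :: fRef cs false 0 else fRef cs counting curr)
    else fRef cs counting curr

-- B's computation on the char list
def gRef (cs : List Char) : List Int :=
  ((cs.splitOn '.').filter (fun seg => seg.contains '#')).map (fun seg => (seg.count '#' : Int))

theorem chkA_eq (cs : List Char) : ∀ (counting : Bool) (curr : Int) (actual : List Int),
    chkA cs counting curr actual =
      if cs.contains '?' then none else some (actual ++ fRef cs counting curr) := by
  induction cs with
  | nil => intro counting curr actual; cases counting <;> simp [chkA, fRef]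
  | cons c cs ih =>
    intro counting curr actual
    by_cases h? : c = '?'
    · subst h?; simp [chkA]
    · by_cases h1 : c = '#'
      · subst h1; simp [chkA, fRef, ih]
      · by_cases h2 : c = '.'
        · subst h2
          cases counting <;> simp [chkA, fRef, ih, h?]
        · have h?' : ¬('?' = c) := fun e => h? e.symm
          simp [chkA, fRef, ih, h?, h?', h1, h2]

theorem splitOnP_dot (cs : List Char) :
    List.splitOn '.' cs = List.splitOnP (fun c => c == '.') cs := rfl

theorem fRef_splitOn (cs : List Char) : ∀ (counting : Bool) (curr : Int),
    (counting = false → curr = 0) →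
    fRef cs counting curr =
      (match List.splitOnP (fun c => c == '.') cs with
       | [] => []
       | s :: rest =>
         (if counting || s.contains '#' then [curr + (s.count '#' : Int)] else []) ++
           (rest.filter (fun seg => seg.contains '#')).map (fun seg => (seg.count '#' : Int))) := by
  induction cs with
  | nil =>
    intro counting curr h
    cases counting
    · simp [fRef, List.splitOnP_nil]
    · simp [fRef, List.splitOnP_nil]
  | cons c cs ih =>
    intro counting curr h
    by_cases h1 : c = '#'
    · subst h1
      rw [List.splitOnP_cons]
      obtain ⟨s, rest, hsr⟩ := List.exists_cons_of_ne_nil (List.splitOnP_ne_nil (fun c => c == '.') cs)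
      have := ih true (curr + 1) (by simp)
      rw [hsr] at this ⊢
      simp only [fRef, this]
      simp [List.modifyHead]
      ring
    · by_cases h2 : c = '.'
      · subst h2
        rw [List.splitOnP_cons]
        obtain ⟨s, rest, hsr⟩ := List.exists_cons_of_ne_nil (List.splitOnP_ne_nil (fun c => c == '.') cs)
        have hfalse : fRef cs false 0 =
            (if s.contains '#' then [(s.count '#' : Int)] else []) ++
              (rest.filter (fun seg => seg.contains '#')).map (fun seg => (seg.count '#' : Int)) := by
          have := ih false 0 (fun _ => rfl)
          rw [hsr] at this
          simpa using this
        cases counting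
        · have hcurr := h rfl
          subst hcurr
          simp only [fRef, hsr]
          simp [hfalse, List.filter_cons]
          split_ifs <;> simp
        · simp only [fRef, hsr]
          simp [hfalse, List.filter_cons]
          split_ifs <;> simp
      · rw [List.splitOnP_cons]
        obtain ⟨s, rest, hsr⟩ := List.exists_cons_of_ne_nil (List.splitOnP_ne_nil (fun c => c == '.') cs)
        have := ih counting curr h
        rw [hsr] at this ⊢
        simp only [fRef, if_neg h1, if_neg h2, this]
        have h1' : ¬('#' = c) := fun e => h1 e.symm
        simp [List.modifyHead, h1, h1', h2]

-- A's initial 'counting = (arr[0] == "#")' is equivalent to starting with counting = false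
theorem fRef_head (c : Char) (cs : List Char) :
    fRef (c :: cs) (c == '#') 0 = fRef (c :: cs) false 0 := by
  by_cases h1 : c = '#'
  · subst h1; simp [fRef]
  · have hb : (c == '#') = false := by simp [h1]
    by_cases h2 : c = '.' <;> simp [fRef, h1, h2, hb]

theorem fRef_eq_gRef (c : Char) (cs : List Char) :
    fRef (c :: cs) (c == '#') 0 = gRef (c :: cs) := by
  rw [fRef_head, fRef_splitOn (c :: cs) false 0 (fun _ => rfl)]
  unfold gRef
  rw [splitOnP_dot]
  obtain ⟨s, rest, hsr⟩ := List.exists_cons_of_ne_nil (List.splitOnP_ne_nil (fun c => c == '.') (c :: cs))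
  rw [hsr]
  simp [List.filter_cons]
  split_ifs <;> simp

-- ===== VERDICT (by name: the statement is the Claim_ definition above) =====
theorem check_arrangement_spec : Claim_equal_check_arrangement := by
  intro arr groups _ hpre
  unfold Spec_check_arrangement check_arrangement check_arrangement_alt
  obtain ⟨c, cs, hcs⟩ := List.exists_cons_of_ne_nil hpre
  have hget : PySem.Str.pyGet? arr 0 = some c := by
    rw [show ((0 : Int)) = ((0 : Nat) : Int) from rfl, PySem.Str.pyGet?_natCast, hcs]
    rfl
  simp only [hget, hcs, chkA_eq]
  by_cases hq : (c :: cs).contains '?' = true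
  · simp only [if_pos hq]
  · simp only [if_neg hq, List.nil_append, fRef_eq_gRef, gRef]
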